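-- pv_equiv track=rewrite | github.com/minhthe/minhthe.007-gmail.com | Explore/August 31 days/13_iterator_combination.py | f
-- ===== SOURCE A (Python) =====
-- def f( start,rst,  tmp, s, n):
-- 	if len(rst) == 10000: return rst
-- 	if len(tmp) == n:
-- 		rst.append(''.join(tmp))
-- 	if len(tmp) < n:
-- 		for i in range(start, len(s)):
-- 			tmp.append(s[i])
-- 			f(i+1, rst ,  tmp,s, n)
-- 			tmp.pop()
-- 	return rst
-- ===== SOURCE B (Python) =====
-- # B: pure, non-mutating generation of the index-combinations (classic head/rest
-- # recursion on a precomputed pool), then one capped append pass -- instead of A's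
-- # backtracking DFS that threads the cap and a shared mutable tmp through every call.
-- # Like A, B appends results to rst in place (tmp is left unchanged; A restores it).
--
-- def _combos(pool, r):
--     # all r-element combinations of pool, in lexicographic (itertools) order
--     if r == 0:
--         return [[]]
--     if not pool:
--         return []
--     rest = pool[1:]
--     return [[pool[0]] + c for c in _combos(rest, r - 1)] + _combos(rest, r)
--
--
-- def f(start, rst, tmp, s, n):
--     if len(rst) == 10000:
--         return rst
--     r = n - len(tmp)
--     if r < 0:
--         return rst
--     if r == 0:
--         rst.append(''.join(tmp))
--         return rst
--     pool = [s[i] for i in range(start, len(s))]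
--     for combo in _combos(pool, r):
--         if len(rst) == 10000:
--             break
--         rst.append(''.join(tmp + combo))
--     return rst
-- ===== Notes on version B (the rewrite author's own statement) =====
-- stated objective: alternative
-- what changed: B replaces A's backtracking DFS (which mutates a shared tmp, threads the 10000-cap through every recursive call, and interleaves generation with appending) by a pure head/rest recursion that builds the full list of combinations of a precomputed character pool, followed by a single capped append pass.
import Mathlib
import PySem

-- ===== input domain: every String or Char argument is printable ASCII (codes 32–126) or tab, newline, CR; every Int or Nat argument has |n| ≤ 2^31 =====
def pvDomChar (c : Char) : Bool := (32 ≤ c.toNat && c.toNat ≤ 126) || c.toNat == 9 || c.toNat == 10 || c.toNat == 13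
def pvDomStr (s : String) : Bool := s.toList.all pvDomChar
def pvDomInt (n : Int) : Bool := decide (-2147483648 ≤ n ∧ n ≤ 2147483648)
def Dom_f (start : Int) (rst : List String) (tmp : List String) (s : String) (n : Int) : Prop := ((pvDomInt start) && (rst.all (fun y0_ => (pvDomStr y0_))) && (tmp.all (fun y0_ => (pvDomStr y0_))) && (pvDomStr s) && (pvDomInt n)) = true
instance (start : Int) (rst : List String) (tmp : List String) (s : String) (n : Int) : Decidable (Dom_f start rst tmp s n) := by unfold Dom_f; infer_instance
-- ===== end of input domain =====

-- B builds the combination list purely, then appends in one capped pass, instead of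
-- A's backtracking DFS with a mutable tmp (both versions append to rst in place;
-- the equivalence proved here is about the return value).

-- ===== PORT A =====
-- A's recursion decreases n - len(tmp); the fuel argument carries exactly that measure
-- (f passes (n - len tmp).toNat, and each recursive call has len tmp one larger).
def fCore (fuel : Nat) (start : Int) (rst : List String) (tmp : List String) (s : String) (n : Int) : List String :=
  if rst.length = 10000 then rst
  else
    let rst1 := if (tmp.length : Int) = n then rst ++ [PySem.Str.join "" tmp] else rst
    if (tmp.length : Int) < n then
      match fuel with
      | 0 => rst1  -- unreachable: fuel = (n - len tmp).toNat > 0 whenever len tmp < n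
      | fuel' + 1 =>
        (PySem.List.pyRange start (PySem.Str.len s) 1).foldl
          (fun r i =>
            match PySem.Str.pyGet? s i with
            | none => r  -- Python raises IndexError here; excluded by Pre_f
            | some c => fCore fuel' (i + 1) r (tmp ++ [c.toString]) s n)
          rst1
    else rst1

def f (start : Int) (rst : List String) (tmp : List String) (s : String) (n : Int) : List String :=
  fCore (n - (tmp.length : Int)).toNat start rst tmp s n

-- ===== PORT B =====
-- pool = [s[i] for i in range(start, len(s))]
def poolOf (s : String) (start : Int) : List String :=
  (PySem.List.pyRange start (PySem.Str.len s) 1).map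
    (fun i =>
      match PySem.Str.pyGet? s i with
      | some c => c.toString
      | none => "")  -- Python raises IndexError here; excluded by Pre_f

-- _combos(pool, r): all r-element combinations, lexicographic order
def combosB : List String → Nat → List (List String)
  | _, 0 => [[]]
  | [], _ + 1 => []
  | p :: rest, r + 1 => (combosB rest r).map (fun c => p :: c) ++ combosB rest (r + 1)

-- the 'for combo in _combos(...)' loop with its cap check and break
def capLoop (tmp : List String) : List (List String) → List String → List String
  | [], rst => rst
  | c :: cs, rst =>
    if rst.length = 10000 then rst
    else capLoop tmp cs (rst ++ [PySem.Str.join "" (tmp ++ c)])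

def f_alt (start : Int) (rst : List String) (tmp : List String) (s : String) (n : Int) : List String :=
  if rst.length = 10000 then rst
  else
    let r : Int := n - (tmp.length : Int)
    if r < 0 then rst
    else if r = 0 then rst ++ [PySem.Str.join "" tmp]
    else capLoop tmp (combosB (poolOf s start) r.toNat) rst

-- ===== PRECONDITION & SPEC =====
-- Pre_f excludes exactly the inputs where A (and B) raise IndexError: the recursion is
-- entered (len rst ≠ 10000, len tmp < n) and start < -len(s), so s[start] is out of range.
def Pre_f (start : Int) (rst : List String) (tmp : List String) (s : String) (n : Int) : Prop :=
  rst.length = 10000 ∨ n ≤ (tmp.length : Int) ∨ -(PySem.Str.len s) ≤ start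
instance (start : Int) (rst : List String) (tmp : List String) (s : String) (n : Int) : Decidable (Pre_f start rst tmp s n) := by unfold Pre_f; infer_instance

def pvWitness_f : Int × List String × List String × String × Int := (0, [], [], "ab", 2)

def Spec_f (start : Int) (rst : List String) (tmp : List String) (s : String) (n : Int) (out : List String) : Prop := out = f_alt start rst tmp s n
instance (start : Int) (rst : List String) (tmp : List String) (s : String) (n : Int) (out : List String) : Decidable (Spec_f start rst tmp s n out) := by unfold Spec_f; infer_instance

-- ===== CLAIM (what is proved, stated in full; the proofs are below) =====
def Claim_equal_f : Prop := ∀ (start : Int) (rst : List String) (tmp : List String) (s : String) (n : Int), Dom_f start rst tmp s n → Pre_f start rst tmp s n → Spec_f start rst tmp s n (f start rst tmp s n)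

-- ===== LEMMAS AND PROOFS =====

theorem combosB_zero (pool : List String) : combosB pool 0 = [[]] := by
  cases pool <;> rfl

theorem capLoop_cap (tmp : List String) (cs : List (List String)) (rst : List String)
    (h : rst.length = 10000) : capLoop tmp cs rst = rst := by
  cases cs <;> simp [capLoop, h]

theorem capLoop_append (tmp : List String) (cs1 cs2 : List (List String)) (rst : List String) :
    capLoop tmp (cs1 ++ cs2) rst = capLoop tmp cs2 (capLoop tmp cs1 rst) := by
  induction cs1 generalizing rst with
  | nil => simp [capLoop]
  | cons c cs ih =>
    simp only [List.cons_append, capLoop]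
    split_ifs with h
    · exact (capLoop_cap _ _ _ h).symm
    · exact ih _

theorem capLoop_map_cons (tmp : List String) (x : String) (cs : List (List String)) (rst : List String) :
    capLoop tmp (cs.map (fun c => x :: c)) rst = capLoop (tmp ++ [x]) cs rst := by
  induction cs generalizing rst with
  | nil => simp [capLoop]
  | cons c cs ih =>
    simp only [List.map_cons, capLoop]
    split_ifs with h
    · rfl
    · rw [show tmp ++ x :: c = (tmp ++ [x]) ++ c by simp, ih]

theorem poolOf_cons (s : String) (start : Int) (h : start < PySem.Str.len s) :
    poolOf s start =
      (match PySem.Str.pyGet? s start with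
       | some c => c.toString
       | none => "") :: poolOf s (start + 1) := by
  rw [poolOf, PySem.List.pyRange_one_cons h, List.map_cons, poolOf]

theorem poolOf_nil (s : String) (start : Int) (h : PySem.Str.len s ≤ start) :
    poolOf s start = [] := by
  rw [poolOf, PySem.List.pyRange_one_eq_nil h, List.map_nil]

theorem pyGet?_isSome (s : String) (i : Int) (h1 : -(PySem.Str.len s) ≤ i) (h2 : i < PySem.Str.len s) :
    ∃ c, PySem.Str.pyGet? s i = some c := by
  cases hc : PySem.Str.pyGet? s i with
  | some c => exact ⟨c, rfl⟩
  | none =>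
    exfalso
    rw [PySem.Str.pyGet?, PySem.Chars.pyGet?_eq_listPyGet?,
        PySem.List.pyGet?_eq_none_iff] at hc
    apply hc
    constructor <;> · simp only [PySem.Str.len_eq] at h1 h2; omega

-- the inner for-loop of A versus a (k+1)-combination pass of B
theorem inner_loop (s : String) (n : Int) (k : Nat) (tmp : List String)
    (hn : n = (tmp.length : Int) + k + 1)
    (H : ∀ (start : Int) (rst tmp' : List String), n = (tmp'.length : Int) + k →
      -(PySem.Str.len s) ≤ start →
      fCore k start rst tmp' s n = capLoop tmp' (combosB (poolOf s start) k) rst) :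
    ∀ (d : Nat) (start : Int), (PySem.Str.len s - start).toNat = d →
      -(PySem.Str.len s) ≤ start → ∀ rst : List String,
      (PySem.List.pyRange start (PySem.Str.len s) 1).foldl
        (fun r i =>
          match PySem.Str.pyGet? s i with
          | none => r
          | some c => fCore k (i + 1) r (tmp ++ [c.toString]) s n)
        rst
      = capLoop tmp (combosB (poolOf s start) (k + 1)) rst := by
  intro d
  induction d with
  | zero =>
    intro start hd hs rst
    have hge : PySem.Str.len s ≤ start := by omega
    rw [PySem.List.pyRange_one_eq_nil hge, poolOf_nil s start hge]
    simp [combosB, capLoop]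
  | succ d ih =>
    intro start hd hs rst
    have hlt : start < PySem.Str.len s := by omega
    obtain ⟨c, hc⟩ := pyGet?_isSome s start hs (by omega)
    rw [PySem.List.pyRange_one_cons hlt, List.foldl_cons, poolOf_cons s start hlt, hc]
    show (PySem.List.pyRange (start+1) (PySem.Str.len s) 1).foldl _
        (fCore k (start + 1) rst (tmp ++ [c.toString]) s n) = _
    rw [combosB, capLoop_append, capLoop_map_cons,
        ← H (start + 1) rst (tmp ++ [c.toString]) (by simp; omega) (by omega)]
    exact ih (start + 1) (by omega) (by omega) _

theorem core (s : String) (n : Int) (fuel : Nat) :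
    ∀ (start : Int) (rst tmp : List String), n = (tmp.length : Int) + fuel →
      -(PySem.Str.len s) ≤ start →
      fCore fuel start rst tmp s n = capLoop tmp (combosB (poolOf s start) fuel) rst := by
  induction fuel with
  | zero =>
    intro start rst tmp hn hs
    by_cases h : rst.length = 10000
    · rw [fCore, if_pos h, capLoop_cap _ _ _ h]
    · have he : ((tmp.length : Int) = n) := by omega
      have hlt : ¬ ((tmp.length : Int) < n) := by omega
      rw [fCore, if_neg h, if_pos he, if_neg hlt, combosB_zero]
      simp [capLoop, h]
  | succ k IH =>
    intro start rst tmp hn hs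
    by_cases h : rst.length = 10000
    · rw [fCore, if_pos h, capLoop_cap _ _ _ h]
    · have hne : ¬ ((tmp.length : Int) = n) := by omega
      have hlt : ((tmp.length : Int) < n) := by omega
      rw [fCore, if_neg h, if_neg hne, if_pos hlt]
      exact inner_loop s n k tmp (by omega) IH (PySem.Str.len s - start).toNat start rfl hs rst

-- ===== VERDICT (by name: the statement is the Claim_ definition above) =====
theorem f_spec : Claim_equal_f := by
  intro start rst tmp s n _ hpre
  unfold Spec_f f f_alt
  by_cases hcap : rst.length = 10000
  · simp [hcap, fCore]
  · rcases lt_trichotomy ((tmp.length : Int)) n with hlt | heq | hgt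
    · have hs : -(PySem.Str.len s) ≤ start := by
        rcases hpre with h | h | h
        · exact absurd h hcap
        · omega
        · exact h
      have hfuel : n = (tmp.length : Int) + (n - (tmp.length : Int)).toNat := by omega
      rw [core s n _ start rst tmp hfuel hs]
      have hr0 : ¬ (n - (tmp.length : Int) < 0) := by omega
      have hr1 : ¬ (n - (tmp.length : Int) = 0) := by omega
      simp only [hcap, if_false, hr0, hr1]
    · have h0 : n - (tmp.length : Int) = 0 := by omega
      rw [fCore]
      simp [hcap, heq]
    · have hneg : n - (tmp.length : Int) < 0 := by omega
      rw [show (n - (tmp.length : Int)).toNat = 0 by omega, fCore]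
      simp [hcap, hneg, show ¬ ((tmp.length : Int) = n) by omega,
            show ¬ ((tmp.length : Int) < n) by omega]
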